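-- pv_equiv track=rewrite | github.com/forbesmyester/unicorn-code-snow | g.py | getScaleSpriteIndex
-- ===== SOURCE A (Python) =====
-- distances = [1, 4, 16, 64]
--
-- def getScaleSpriteIndex(distance):
--     r = 0
--     for d in distances:
--         if distance < d:
--             return r
--         r = r + 1
--         if r == 4:
--             return -1
-- ===== SOURCE B (Python) =====
-- import bisect
--
-- distances = [1, 4, 16, 64]
--
-- def getScaleSpriteIndex(distance):
--     k = bisect.bisect_right(distances, distance)
--     return -1 if k == 4 else k
-- ===== Notes on version B (the rewrite author's own statement) =====
-- stated objective: idiomatic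
-- what changed: Replaces the manual left-to-right scan with a counter by a bisect_right binary search over the sorted thresholds, mapping the full count 4 to the -1 sentinel.
import Mathlib
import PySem

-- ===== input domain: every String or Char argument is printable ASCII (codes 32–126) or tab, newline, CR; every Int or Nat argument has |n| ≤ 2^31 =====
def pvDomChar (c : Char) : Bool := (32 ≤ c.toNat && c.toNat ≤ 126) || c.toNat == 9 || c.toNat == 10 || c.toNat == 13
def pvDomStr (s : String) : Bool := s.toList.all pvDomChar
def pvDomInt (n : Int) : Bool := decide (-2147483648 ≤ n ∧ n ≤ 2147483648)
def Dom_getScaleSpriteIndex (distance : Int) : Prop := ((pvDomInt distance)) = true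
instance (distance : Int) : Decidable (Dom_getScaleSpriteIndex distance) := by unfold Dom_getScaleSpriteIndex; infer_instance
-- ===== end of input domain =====

-- B replaces A's linear scan over the thresholds by a bisect_right binary search (idiomatic, same values).

-- ===== PORT A =====
-- A's for-loop over `distances` with counter r; the nil fall-through (Python would return
-- None) is unreachable since r reaches 4 on the 4-element list; we return 0 there.
def getScaleSpriteIndexLoop (ds : List Int) (distance : Int) (r : Int) : Int :=
  match ds with
  | [] => 0  -- unreachable for the actual 4-element distances list
  | d :: rest =>
    if distance < d then r
    else if r + 1 == 4 then -1
    else getScaleSpriteIndexLoop rest distance (r + 1)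

def getScaleSpriteIndex (distance : Int) : Int :=
  getScaleSpriteIndexLoop [1, 4, 16, 64] distance 0

-- ===== PORT B =====
-- bisect.bisect_right: binary search, lo/hi invariant exactly as in CPython's bisect.
def bisectRight (xs : List Int) (x : Int) (lo hi : Nat) : Nat :=
  if h : lo < hi then
    let mid := (lo + hi) / 2
    if x < xs.getD mid 0 then bisectRight xs x lo mid
    else bisectRight xs x (mid + 1) hi
  else lo
termination_by hi - lo
decreasing_by all_goals omega

def getScaleSpriteIndex_alt (distance : Int) : Int :=
  let k := bisectRight [1, 4, 16, 64] distance 0 4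
  if k == 4 then -1 else (k : Int)

-- ===== PRECONDITION & SPEC =====
def Spec_getScaleSpriteIndex (distance : Int) (out : Int) : Prop := out = getScaleSpriteIndex_alt distance
instance (distance : Int) (out : Int) : Decidable (Spec_getScaleSpriteIndex distance out) := by unfold Spec_getScaleSpriteIndex; infer_instance

-- ===== CLAIM (what is proved, stated in full; the proofs are below) =====
def Claim_equal_getScaleSpriteIndex : Prop := ∀ (distance : Int), Dom_getScaleSpriteIndex distance → Spec_getScaleSpriteIndex distance (getScaleSpriteIndex distance)

-- ===== LEMMAS AND PROOFS =====

theorem bisectRight_distances (d : Int) : bisectRight [1, 4, 16, 64] d 0 4 =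
    if d < 1 then 0 else if d < 4 then 1 else if d < 16 then 2 else if d < 64 then 3 else 4 := by
  by_cases h1 : d < 1
  · simp [bisectRight, h1, show d < 4 by omega, show d < 16 by omega]
  · by_cases h2 : d < 4
    · simp [bisectRight, h1, h2, show d < 16 by omega]
    · by_cases h3 : d < 16
      · simp [bisectRight, h1, h2, h3]
      · by_cases h4 : d < 64
        · simp [bisectRight, h1, h2, h3, h4]
        · simp [bisectRight, h1, h2, h3, h4]

-- ===== VERDICT (by name: the statement is the Claim_ definition above) =====
theorem getScaleSpriteIndex_spec : Claim_equal_getScaleSpriteIndex := by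
  intro d _
  unfold Spec_getScaleSpriteIndex getScaleSpriteIndex getScaleSpriteIndex_alt
  rw [bisectRight_distances]
  simp only [getScaleSpriteIndexLoop, beq_iff_eq]
  norm_num
  split_ifs <;> omega
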